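-- pv_equiv track=rewrite | github.com/JHyuna/AlgorithmStudyNowon | pro_lv1/문자열 내 마음대로 정렬하기.py | solution
-- ===== SOURCE A (Python) =====
-- def solution(strings,n):
--     lar = list()
--     for i in range(len(strings)):
--         lar.append(strings[i][n]+strings[i])
--     lar.sort()
--
--     for i in range(len(lar)):
--         lar[i] = lar[i][1:]
--     return lar
-- ===== SOURCE B (Python) =====
-- def solution(strings, n):
--     # recursive quicksort on the key (s[n], s) instead of decorate-sort-undecorate;
--     # the key determines s entirely, so the ordering is total and ties are equal strings
--     if not strings:
--         return []
--     pivot, rest = strings[0], strings[1:]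
--
--     def less(a, b):
--         return a[n] < b[n] or (a[n] == b[n] and a < b)
--
--     lo = [s for s in rest if less(s, pivot)]
--     hi = [s for s in rest if not less(s, pivot)]
--     return solution(lo, n) + [pivot] + solution(hi, n)
-- ===== Notes on version B (the rewrite author's own statement) =====
-- stated objective: alternative
-- what changed: Replaces decorate-sort-undecorate (build s[n]+s, library sort, strip) with an explicit recursive quicksort that partitions around the first string by the key (s[n], s); correct because that key is injective, so the ordering is total and equal keys mean equal strings.
import Mathlib
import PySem

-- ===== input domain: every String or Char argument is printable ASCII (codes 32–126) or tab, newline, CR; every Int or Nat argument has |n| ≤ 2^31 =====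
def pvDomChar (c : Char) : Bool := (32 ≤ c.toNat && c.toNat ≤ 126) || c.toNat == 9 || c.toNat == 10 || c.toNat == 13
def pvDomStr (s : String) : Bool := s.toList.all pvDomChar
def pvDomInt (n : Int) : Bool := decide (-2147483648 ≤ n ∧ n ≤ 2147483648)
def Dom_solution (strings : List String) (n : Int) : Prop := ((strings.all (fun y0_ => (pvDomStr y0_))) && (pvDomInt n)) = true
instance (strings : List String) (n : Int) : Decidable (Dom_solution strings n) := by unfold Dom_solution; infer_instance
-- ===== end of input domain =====

-- B replaces A's decorate-sort-undecorate (build s[n]+s, library sort, strip) with an explicit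
-- recursive quicksort partitioning around the first string by the key (s[n], s) — alternative algorithm, same result.


-- ===== PORT A =====
-- A: lar = [strings[i][n] + strings[i] for i via explicit loop]; lar.sort(); lar[i] = lar[i][1:] in place.
def solution (strings : List String) (n : Int) : List String :=
  let lar : List String :=
    (PySem.List.pyRange 0 (PySem.List.len strings) 1).foldl
      (fun lar i =>
        lar ++ [String.ofList (PySem.List.pyGetD (PySem.List.pyGetD strings i "").toList n ' ' ::
                               (PySem.List.pyGetD strings i "").toList)]) []
  let lar2 := PySem.List.sorted lar (fun x => x) false
  (PySem.List.pyRange 0 (PySem.List.len lar2) 1).foldl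
    (fun acc i => PySem.List.pySetD acc i (PySem.Str.slice (PySem.List.pyGetD acc i "") (some 1) none))
    lar2

-- ===== PORT B =====
-- B's comparison less(a, b): a[n] < b[n]  or  (a[n] == b[n] and a < b)
def pvKeyLt (n : Int) (a b : String) : Bool :=
  decide (PySem.List.pyGetD a.toList n ' ' < PySem.List.pyGetD b.toList n ' ') ||
  (decide (PySem.List.pyGetD a.toList n ' ' = PySem.List.pyGetD b.toList n ' ') && decide (a < b))

-- B: quicksort — partition rest around pivot = strings[0] by less, recurse on both sides.
def solution_alt (strings : List String) (n : Int) : List String :=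
  match strings with
  | [] => []
  | pivot :: rest =>
      solution_alt (rest.filter (fun s => pvKeyLt n s pivot)) n ++ [pivot] ++
      solution_alt (rest.filter (fun s => !pvKeyLt n s pivot)) n
termination_by strings.length
decreasing_by
  · simp
    exact List.length_filter_le _ _
  · simp
    exact le_trans (List.length_filter_le _ _) (by simp)

-- ===== PRECONDITION & SPEC =====
-- Pre_ excludes exactly the inputs where Python's s[n] raises IndexError (in both A and B):
-- every string must admit index n (negative indices count from the end).
def Pre_solution (strings : List String) (n : Int) : Prop :=
  ∀ s ∈ strings, PySem.Raise.InRange s.toList.length n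
instance (strings : List String) (n : Int) : Decidable (Pre_solution strings n) := by
  unfold Pre_solution; infer_instance
def pvWitness_solution : List String × Int := (["sun", "bed", "car"], 1)

def Spec_solution (strings : List String) (n : Int) (out : List String) : Prop := out = solution_alt strings n
instance (strings : List String) (n : Int) (out : List String) : Decidable (Spec_solution strings n out) := by unfold Spec_solution; infer_instance

-- ===== CLAIM (what is proved, stated in full; the proofs are below) =====
def Claim_equal_solution : Prop := ∀ (strings : List String) (n : Int), Dom_solution strings n → Pre_solution strings n → Spec_solution strings n (solution strings n)

-- ===== LEMMAS AND PROOFS =====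

-- the decoration s ↦ s[n] + s of A's first loop
def pvDec (n : Int) (s : String) : String :=
  String.ofList (PySem.List.pyGetD s.toList n ' ' :: s.toList)

-- stripping the first character recovers the original string
theorem pvStrip_pvDec (n : Int) (s : String) :
    PySem.Str.slice (pvDec n s) (some 1) none = s := by
  apply String.toList_inj.mp
  simp [pvDec, PySem.Str.toList_slice, PySem.List.slice_from_one]

theorem pvDec_injective (n : Int) : Function.Injective (pvDec n) := by
  intro a b h
  have := congrArg (fun t => PySem.Str.slice t (some 1) none) h
  simpa [pvStrip_pvDec] using this

-- B's comparison is exactly the decorated-string comparison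
theorem pvKeyLt_iff (n : Int) (a b : String) :
    pvKeyLt n a b = true ↔ pvDec n a < pvDec n b := by
  simp only [pvKeyLt, pvDec, String.lt_iff_toList_lt, String.toList_ofList,
    List.cons_lt_cons_iff, Bool.or_eq_true, Bool.and_eq_true, decide_eq_true_eq]

-- A's first loop builds the decorated list
theorem pvFirstLoop (strings : List String) (n : Int) :
    (PySem.List.pyRange 0 (PySem.List.len strings) 1).foldl
      (fun lar i =>
        lar ++ [String.ofList (PySem.List.pyGetD (PySem.List.pyGetD strings i "").toList n ' ' ::
                               (PySem.List.pyGetD strings i "").toList)]) []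
    = strings.map (pvDec n) := by
  have h := PySem.List.foldl_pyRange_zero_pyGetD strings "" (fun acc s => acc ++ [pvDec n s]) []
  simp only [pvDec] at h
  rw [h, PySem.List.foldl_append_singleton_eq_map]
  simp [pvDec]

-- the in-place update loop lar[i] = g(lar[i]) is map g
theorem pvSetLoop {α : Type} (g : α → α) (d : α) (rest : List α) : ∀ done : List α,
    (PySem.List.pyRange (done.length : Int) ((done.length : Int) + (rest.length : Int)) 1).foldl
      (fun acc i => PySem.List.pySetD acc i (g (PySem.List.pyGetD acc i d))) (done ++ rest)
    = done ++ rest.map g := by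
  induction rest with
  | nil => intro done; simp [PySem.List.pyRange_one_eq_nil]
  | cons r rs ih =>
    intro done
    rw [PySem.List.pyRange_one_cons (by push_cast [List.length_cons]; omega)]
    simp only [List.foldl_cons]
    have hget : PySem.List.pyGetD (done ++ r :: rs) (done.length : Int) d = r := by
      rw [PySem.List.pyGetD_natCast]
      simp [List.getD]
    have hset : PySem.List.pySetD (done ++ r :: rs) (done.length : Int) (g r)
        = (done ++ [g r]) ++ rs := by
      rw [PySem.List.pySetD_natCast]
      rw [List.set_append_right _ _ (le_refl _)]
      simp
    rw [hget, hset]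
    have ha : (done.length : Int) + 1 = (((done ++ [g r]).length : Nat) : Int) := by
      simp
    have hb : (done.length : Int) + ((r :: rs).length : Int)
        = (((done ++ [g r]).length : Nat) : Int) + (rs.length : Int) := by
      simp; ring
    rw [ha, hb, ih (done ++ [g r])]
    simp

-- quicksort returns a permutation of its input
theorem pvQsort_perm (strings : List String) (n : Int) :
    (solution_alt strings n).Perm strings := by
  fun_induction solution_alt strings n with
  | case1 => exact List.Perm.refl []
  | case2 pivot rest ih1 ih2 =>
    simp only [List.unattach_filter, List.unattach_attach] at ih1 ih2
    have h1 : (solution_alt (rest.filter (fun s => pvKeyLt n s pivot)) n ++ [pivot] ++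
          solution_alt (rest.filter (fun s => !pvKeyLt n s pivot)) n).Perm
        (rest.filter (fun s => pvKeyLt n s pivot) ++ [pivot] ++
          rest.filter (fun s => !pvKeyLt n s pivot)) :=
      (ih1.append (List.Perm.refl _)).append ih2
    have h2 : (rest.filter (fun s => pvKeyLt n s pivot) ++ [pivot] ++
          rest.filter (fun s => !pvKeyLt n s pivot)).Perm
        (pivot :: (rest.filter (fun s => pvKeyLt n s pivot) ++
          rest.filter (fun s => !pvKeyLt n s pivot))) := by
      simp [List.perm_middle]
    exact (h1.trans h2).trans ((List.filter_append_perm _ rest).cons pivot)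

-- quicksort output is ordered by the decorated key
theorem pvQsort_pairwise (strings : List String) (n : Int) :
    (solution_alt strings n).Pairwise (fun a b => pvDec n a ≤ pvDec n b) := by
  fun_induction solution_alt strings n with
  | case1 => exact List.Pairwise.nil
  | case2 pivot rest ih1 ih2 =>
    simp only [List.unattach_filter, List.unattach_attach] at ih1 ih2
    have hlo : ∀ x ∈ solution_alt (rest.filter (fun s => pvKeyLt n s pivot)) n,
        pvDec n x < pvDec n pivot := by
      intro x hx
      have := (pvQsort_perm _ n).mem_iff.mp hx
      have hf := List.of_mem_filter this
      exact (pvKeyLt_iff n x pivot).mp hf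
    have hhi : ∀ y ∈ solution_alt (rest.filter (fun s => !pvKeyLt n s pivot)) n,
        pvDec n pivot ≤ pvDec n y := by
      intro y hy
      have := (pvQsort_perm _ n).mem_iff.mp hy
      have hf := List.of_mem_filter this
      have : pvKeyLt n y pivot = false := by
        simpa using hf
      exact not_lt.mp (fun hc => by simp [(pvKeyLt_iff n y pivot).mpr hc] at this)
    rw [List.pairwise_append]
    refine ⟨?_, ih2, ?_⟩
    · rw [List.pairwise_append]
      refine ⟨ih1, by simp, ?_⟩
      intro x hx y hy
      simp at hy; subst hy
      exact le_of_lt (hlo x hx)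
    · intro x hx y hy
      rcases List.mem_append.mp hx with hx | hx
      · exact le_trans (le_of_lt (hlo x hx)) (hhi y hy)
      · simp at hx; subst hx; exact hhi y hy

-- ===== VERDICT (by name: the statement is the Claim_ definition above) =====
theorem solution_spec : Claim_equal_solution := by
  intro strings n _ _
  unfold Spec_solution solution
  simp only [pvFirstLoop strings n]
  have hA : (PySem.List.pyRange 0
        (PySem.List.len (PySem.List.sorted (strings.map (pvDec n)) (fun x => x) false)) 1).foldl
      (fun acc i => PySem.List.pySetD acc i (PySem.Str.slice (PySem.List.pyGetD acc i "") (some 1) none))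
      (PySem.List.sorted (strings.map (pvDec n)) (fun x => x) false)
      = (PySem.List.sorted (strings.map (pvDec n)) (fun x => x) false).map
          (fun t => PySem.Str.slice t (some 1) none) := by
    have h := pvSetLoop (fun t => PySem.Str.slice t (some 1) none) ""
      (PySem.List.sorted (strings.map (pvDec n)) (fun x => x) false) []
    simp only [List.length_nil, Nat.cast_zero, List.nil_append, zero_add] at h
    simp only [PySem.List.len_eq]
    exact h
  rw [hA]
  -- both sides are strings permuted and ordered by the injective key pvDec n
  apply PySem.List.eq_of_perm_of_pairwise_le_of_injective (pvDec n) (pvDec_injective n)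
  · -- permutation
    have h1 : ((PySem.List.sorted (strings.map (pvDec n)) (fun x => x) false).map
        (fun t => PySem.Str.slice t (some 1) none)).Perm strings := by
      have := List.Perm.map (fun t => PySem.Str.slice t (some 1) none)
        (PySem.List.sorted_perm (strings.map (pvDec n)) (fun x => x) false)
      simpa [List.map_map, Function.comp_def, pvStrip_pvDec, List.map_id'] using this
    exact h1.trans (pvQsort_perm strings n).symm
  · -- A side ordered
    have hp := PySem.List.sorted_pairwise (strings.map (pvDec n)) (fun x => x)
    rw [List.pairwise_map]
    refine hp.imp_of_mem ?_
    intro a b ha hb hab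
    have ha' : pvDec n (PySem.Str.slice a (some 1) none) = a := by
      obtain ⟨s, _, rfl⟩ := List.mem_map.mp ((PySem.List.mem_sorted _ _ _ _).mp ha)
      rw [pvStrip_pvDec]
    have hb' : pvDec n (PySem.Str.slice b (some 1) none) = b := by
      obtain ⟨s, _, rfl⟩ := List.mem_map.mp ((PySem.List.mem_sorted _ _ _ _).mp hb)
      rw [pvStrip_pvDec]
    rw [ha', hb']; exact hab
  · exact pvQsort_pairwise strings n
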